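-- pv_equiv track=rewrite | github.com/violapaul/RegattaAnalysis | metadata_rt.py | reorder_some_keys
-- ===== SOURCE A (Python) =====
-- import copy
--
-- def reorder_some_keys(dictionary, keys):
--     "Return a dictionary with the keys in the order presented in keys."
--     d = copy.copy(dictionary)
--     res = dict()
--     # Copy the ones in keys
--     for k in keys:
--         if k in d:
--             res[k] = d.pop(k)
--     # Copy the rest.
--     for k in d.keys():
--         res[k] = d[k]
--     return res
-- ===== SOURCE B (Python) =====
-- def reorder_some_keys(dictionary, keys):
--     "Return a dictionary with the keys in the order presented in keys."
--     front = [k for k in dict.fromkeys(keys) if k in dictionary]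
--     seen = set(front)
--     order = front + [k for k in dictionary if k not in seen]
--     return {k: dictionary[k] for k in order}
-- ===== Notes on version B (the rewrite author's own statement) =====
-- stated objective: simpler
-- what changed: B never mutates a dict copy: it first computes the key ORDER as a list (dedup'd requested keys that are present, then the remaining keys in insertion order) and then builds the result in one dict comprehension, replacing A's copy.copy + two pop/insert mutation loops.
import Mathlib
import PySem

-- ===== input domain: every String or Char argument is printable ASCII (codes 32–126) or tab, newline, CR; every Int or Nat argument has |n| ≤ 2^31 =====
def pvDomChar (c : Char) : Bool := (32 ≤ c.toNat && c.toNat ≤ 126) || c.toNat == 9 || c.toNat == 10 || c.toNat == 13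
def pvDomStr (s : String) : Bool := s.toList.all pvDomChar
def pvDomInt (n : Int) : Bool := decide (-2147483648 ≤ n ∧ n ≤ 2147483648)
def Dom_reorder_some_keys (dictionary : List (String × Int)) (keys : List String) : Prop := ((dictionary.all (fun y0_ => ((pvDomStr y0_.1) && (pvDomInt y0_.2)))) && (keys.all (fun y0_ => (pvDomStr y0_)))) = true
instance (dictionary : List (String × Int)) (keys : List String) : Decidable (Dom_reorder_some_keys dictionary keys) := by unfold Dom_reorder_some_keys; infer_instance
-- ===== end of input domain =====

-- B computes the key order as a list (requested-and-present keys first, then the rest) and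
-- builds the result in one comprehension, instead of A's copy + two pop/insert mutation loops
-- (objective: simpler; return value only — neither version mutates its arguments observably).


-- ===== PORT A =====
-- for k in keys: if k in d: res[k] = d.pop(k)
def reorderStepA (s : PySem.Dict String Int × PySem.Dict String Int) (k : String) :
    PySem.Dict String Int × PySem.Dict String Int :=
  if s.1.contains k then
    match PySem.Dict.pop? s.1 k with
    | some (v, d') => (d', s.2.insert k v)
    | none => s
  else s

def reorder_some_keys (dictionary : List (String × Int)) (keys : List String) : List (String × Int) :=
  let d := PySem.Dict.mk dictionary          -- d = copy.copy(dictionary)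
  let s := keys.foldl reorderStepA (d, PySem.Dict.empty)
  -- for k in d.keys(): res[k] = d[k]
  let res := s.1.keys.foldl (fun r k => r.insert k ((s.1.get? k).getD 0)) s.2
  res.items

-- ===== PORT B =====
def reorder_some_keys_alt (dictionary : List (String × Int)) (keys : List String) : List (String × Int) :=
  let d := PySem.Dict.mk dictionary
  let front := (PySem.List.dedup keys).filter (fun k => d.contains k)   -- dict.fromkeys = PySem.List.dedup
  let seen := PySem.Set.ofList front
  let order := front ++ d.keys.filter (fun k => !(PySem.Set.contains seen k))
  order.map (fun k => (k, d.getD k 0))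

-- ===== PRECONDITION & SPEC =====
-- Pre_ only states that the association list really encodes a Python dict (distinct keys);
-- every dict input satisfies it, so nothing A accepts is excluded.
def Pre_reorder_some_keys (dictionary : List (String × Int)) (keys : List String) : Prop :=
  (dictionary.map Prod.fst).Nodup
instance (dictionary : List (String × Int)) (keys : List String) : Decidable (Pre_reorder_some_keys dictionary keys) := by unfold Pre_reorder_some_keys; infer_instance
def pvWitness_reorder_some_keys : (List (String × Int)) × List String :=
  ([("a", 1), ("b", 2), ("c", 3)], ["c", "x", "a", "c"])
def Spec_reorder_some_keys (dictionary : List (String × Int)) (keys : List String) (out : List (String × Int)) : Prop := out = reorder_some_keys_alt dictionary keys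
instance (dictionary : List (String × Int)) (keys : List String) (out : List (String × Int)) : Decidable (Spec_reorder_some_keys dictionary keys out) := by unfold Spec_reorder_some_keys; infer_instance

-- ===== CLAIM (what is proved, stated in full; the proofs are below) =====
def Claim_equal_reorder_some_keys : Prop := ∀ (dictionary : List (String × Int)) (keys : List String), Dom_reorder_some_keys dictionary keys → Pre_reorder_some_keys dictionary keys → Spec_reorder_some_keys dictionary keys (reorder_some_keys dictionary keys)

-- ===== LEMMAS AND PROOFS =====

-- the keys A's first loop actually pops, in order (k is taken iff still present)
def selKeys : List String → PySem.Dict String Int → List String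
  | [], _ => []
  | k :: ks, d => if d.contains k then k :: selKeys ks (d.erase k) else selKeys ks d

theorem not_band_elim {a b : Bool} (h : (!a && b) = true) : a = false ∧ b = true := by
  cases a <;> cases b <;> simp_all

theorem find?_filter_ne (l : List (String × Int)) (k k' : String) (h : k' ≠ k) :
    (l.filter (fun p => !(p.1 == k))).find? (fun p => p.1 == k') = l.find? (fun p => p.1 == k') := by
  induction l with
  | nil => simp
  | cons p l ih =>
    by_cases hk : p.1 = k
    · have h1 : (p.1 == k) = true := by simp [hk]
      have h2 : (p.1 == k') = false := by simp [hk]; exact fun e => h e.symm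
      simp [List.filter_cons, h1, List.find?_cons, h2, ih]
    · have h1 : (p.1 == k) = false := by simp [hk]
      by_cases hk' : p.1 = k'
      · have h2 : (p.1 == k') = true := by simp [hk']
        simp [List.filter_cons, h1, List.find?_cons, h2]
      · have h2 : (p.1 == k') = false := by simp [hk']
        simp [List.filter_cons, h1, List.find?_cons, h2, ih]

theorem get?_erase_of_ne (d : PySem.Dict String Int) (k k' : String) (h : k' ≠ k) :
    (d.erase k).get? k' = d.get? k' := by
  simp only [PySem.Dict.erase, PySem.Dict.get?]
  rw [find?_filter_ne _ _ _ h]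

theorem contains_erase (d : PySem.Dict String Int) (k k' : String) :
    (d.erase k).contains k' = (!(k' == k) && d.contains k') := by
  simp only [PySem.Dict.erase, PySem.Dict.contains]
  induction d.items with
  | nil => simp
  | cons p l ih =>
    by_cases hk : p.1 = k
    · have h1 : (p.1 == k) = true := by simp [hk]
      by_cases hk' : k' = k
      · simp [List.filter_cons, h1, hk', hk]
      · have h2 : (p.1 == k') = false := by
          simp [hk]; exact fun e => hk' e.symm
        simp [List.filter_cons, h1, List.any_cons, h2, ih]
    · have h1 : (p.1 == k) = false := by simp [hk]
      simp only [List.filter_cons, h1, Bool.not_false, if_true, List.any_cons, ih]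
      by_cases hk' : p.1 = k'
      · have h2 : (p.1 == k') = true := by simp [hk']
        have h3 : (k' == k) = false := by simp; intro e; exact hk (hk'.symm ▸ e ▸ rfl)
        simp [h2, h3]
      · have h2 : (p.1 == k') = false := by simp [hk']
        simp [h2]

theorem selKeys_mem (ks : List String) (d : PySem.Dict String Int) (k' : String)
    (h : k' ∈ selKeys ks d) : d.contains k' = true := by
  induction ks generalizing d with
  | nil => simp [selKeys] at h
  | cons k ks ih =>
    simp only [selKeys] at h
    by_cases hc : d.contains k = true
    · rw [if_pos hc] at h
      rcases List.mem_cons.mp h with h1 | h1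
      · exact h1 ▸ hc
      · have := ih _ h1
        rw [contains_erase] at this
        exact (not_band_elim this).2
    · rw [if_neg hc] at h
      exact ih _ h

theorem discard_eq_filter (s : PySem.Set String) (x : String) :
    PySem.Set.discard s x = s.filter (fun y => !(y == x)) := rfl

-- B's front list equals A's popped-key list
theorem front_eq_selKeys (ks : List String) (d : PySem.Dict String Int) :
    (PySem.Set.ofList ks).filter (fun k => d.contains k) = selKeys ks d := by
  induction ks generalizing d with
  | nil => simp [selKeys, PySem.Set.ofList, PySem.Set.empty]
  | cons k ks ih =>
    rw [PySem.Set.ofList_cons, discard_eq_filter]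
    simp only [selKeys]
    by_cases hc : d.contains k = true
    · rw [if_pos hc]
      simp only [List.filter_cons, hc, if_pos, List.filter_filter]
      rw [← ih (d.erase k)]
      congr 1
      apply List.filter_congr
      intro j _
      rw [contains_erase]
      rw [Bool.and_comm]
    · rw [if_neg hc]
      have hcf : d.contains k = false := by
        cases hfc : d.contains k
        · rfl
        · exact absurd hfc hc
      simp only [List.filter_cons, hcf]
      rw [List.filter_filter, ← ih d]
      apply List.filter_congr
      intro j hj
      cases hdj : d.contains j
      · simp
      · have hjk : (j == k) = false := by
          simp only [beq_eq_false_iff_ne, ne_eq]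
          intro e; rw [e] at hdj; rw [hdj] at hcf; exact Bool.true_eq_false.mp hcf
        simp [hjk]

-- A's first loop, characterised
theorem loopA_eq (ks : List String) (d res : PySem.Dict String Int)
    (hdis : ∀ k, d.contains k = true → res.contains k = false) :
    ks.foldl reorderStepA (d, res) =
      ((selKeys ks d).foldl PySem.Dict.erase d,
       PySem.Dict.mk (res.items ++ (selKeys ks d).map (fun k => (k, d.getD k 0)))) := by
  induction ks generalizing d res with
  | nil => simp [selKeys]
  | cons k ks ih =>
    rw [List.foldl_cons]
    by_cases hc : d.contains k = true
    · have hg : (d.get? k).isSome := by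
        rw [← PySem.Dict.contains_eq_isSome_get?]; exact hc
      obtain ⟨v, hv⟩ := Option.isSome_iff_exists.mp hg
      have hstep : reorderStepA (d, res) k = (d.erase k, res.insert k v) := by
        simp [reorderStepA, hc, PySem.Dict.pop?, hv]
      rw [hstep]
      have hdis' : ∀ j, (d.erase k).contains j = true → (res.insert k v).contains j = false := by
        intro j hj
        rw [contains_erase] at hj
        obtain ⟨hjk, hdj⟩ := not_band_elim hj
        rw [PySem.Dict.contains_insert, hjk, hdis j hdj, Bool.or_self]
      rw [ih (d.erase k) (res.insert k v) hdis']
      have hsel : selKeys (k :: ks) d = k :: selKeys ks (d.erase k) := by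
        simp [selKeys, hc]
      rw [hsel, List.foldl_cons]
      simp only [Prod.mk.injEq, PySem.Dict.mk.injEq]
      refine ⟨trivial, ?_⟩
      rw [PySem.Dict.items_insert_of_not_contains res v (hdis k hc)]
      have hvD : d.getD k 0 = v := by
        simp [PySem.Dict.getD, hv]
      have hmap : (selKeys ks (d.erase k)).map (fun j => (j, (d.erase k).getD j 0)) =
          (selKeys ks (d.erase k)).map (fun j => (j, d.getD j 0)) := by
        apply List.map_congr_left
        intro j hj
        have hcj := selKeys_mem _ _ _ hj
        rw [contains_erase] at hcj
        obtain ⟨hjk, _⟩ := not_band_elim hcj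
        have hne : j ≠ k := by simpa using hjk
        simp only [PySem.Dict.getD, get?_erase_of_ne d k j hne]
      rw [hmap, List.map_cons, hvD]
      simp
    · have hcf : d.contains k = false := by
        cases hfc : d.contains k
        · rfl
        · exact absurd hfc hc
      have hstep : reorderStepA (d, res) k = (d, res) := by
        simp [reorderStepA, hcf]
      rw [hstep, ih d res hdis]
      simp [selKeys, hcf]

theorem foldl_erase_items (l : List String) (d : PySem.Dict String Int) :
    (l.foldl PySem.Dict.erase d).items = d.items.filter (fun p => !(l.contains p.1)) := by
  induction l generalizing d with
  | nil => simp
  | cons k l ih =>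
    rw [List.foldl_cons, ih]
    simp only [PySem.Dict.erase, List.filter_filter]
    apply List.filter_congr
    intro p _
    rw [List.contains_cons, Bool.not_or]
    cases (p.1 == k) <;> cases (l.contains p.1) <;> rfl

-- filtering pairs (k, g k) on the key commutes with building them
theorem filter_fst_map (l : List String) (g : String → Int) (sel : List String) :
    (l.map (fun k => (k, g k))).filter (fun q => !sel.contains q.1) =
      (l.filter (fun k => !sel.contains k)).map (fun k => (k, g k)) := by
  induction l with
  | nil => rfl
  | cons k l ih =>
    have ih' := ih
    simp only [List.contains_eq_mem] at ih' ⊢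
    by_cases hp : k ∈ sel
    · simp [List.filter_cons, hp, ih']
    · simp [List.filter_cons, hp, ih']

-- a nodup dict's items, filtered on the key
theorem items_filter_sel (d : PySem.Dict String Int) (hnd : d.keys.Nodup) (sel : List String) :
    d.items.filter (fun p => !sel.contains p.1) =
      (d.keys.filter (fun k => !sel.contains k)).map (fun k => (k, d.getD k 0)) := by
  rw [PySem.Dict.items_eq_map_keys d hnd 0, filter_fst_map d.keys (fun k => d.getD k 0) sel]

-- ===== VERDICT (by name: the statement is the Claim_ definition above) =====
theorem reorder_some_keys_spec : Claim_equal_reorder_some_keys := by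
  intro dictionary keys _ hpre
  unfold Spec_reorder_some_keys
  unfold reorder_some_keys reorder_some_keys_alt
  simp only []
  set d : PySem.Dict String Int := PySem.Dict.mk dictionary with hd
  have hnd : d.keys.Nodup := hpre
  have hdis0 : ∀ k, d.contains k = true → (PySem.Dict.empty : PySem.Dict String Int).contains k = false := by
    intro k _; simp [PySem.Dict.empty, PySem.Dict.contains]
  rw [loopA_eq keys d PySem.Dict.empty hdis0]
  set sel := selKeys keys d with hsel
  set dRem := sel.foldl PySem.Dict.erase d with hdRem
  set resF := PySem.Dict.mk ((PySem.Dict.empty : PySem.Dict String Int).items ++ sel.map (fun k => (k, d.getD k 0))) with hresF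
  have hresFitems : resF.items = sel.map (fun k => (k, d.getD k 0)) := by
    simp [hresF, PySem.Dict.empty]
  -- second loop appends dRem's items
  have hRemItems : dRem.items = d.items.filter (fun p => !(sel.contains p.1)) := foldl_erase_items sel d
  have hRemKeys : dRem.keys = d.keys.filter (fun k => !(sel.contains k)) := by
    show dRem.items.map Prod.fst = _
    rw [hRemItems, PySem.Dict.items_eq_map_keys d hnd 0, filter_fst_map d.keys (fun k => d.getD k 0) sel, List.map_map]
    simp [Function.comp_def]
  have hRemNodup : dRem.keys.Nodup := by
    rw [hRemKeys]; exact hnd.filter _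
  have hfresh : ∀ a ∈ dRem.keys, resF.contains a = false := by
    intro a ha
    rw [hRemKeys, List.mem_filter] at ha
    obtain ⟨_, hnsel⟩ := ha
    have hna : a ∉ sel := by simpa using hnsel
    have h1 : resF.contains a = sel.any (fun j => j == a) := by
      simp only [PySem.Dict.contains, hresFitems, List.any_map]
      rfl
    rw [h1, List.any_eq_false]
    intro j hj hje
    exact hna ((eq_of_beq hje) ▸ hj)
  have hloop2 := PySem.Dict.items_foldl_insert_fresh (l := dRem.keys)
      (k := fun a => a) (v := fun a => (dRem.get? a).getD 0) (d := resF)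
      (by intro a ha; exact hfresh a ha) (by simpa using hRemNodup)
  rw [hloop2, hresFitems]
  have hRemSelf : dRem.keys.map (fun a => (a, (dRem.get? a).getD 0)) = dRem.items := by
    rw [PySem.Dict.items_eq_map_keys dRem hRemNodup 0]
    rfl
  rw [hRemSelf]
  -- now the B side
  have hfront : (PySem.List.dedup keys).filter (fun k => d.contains k) = sel := by
    rw [PySem.List.dedup_eq_ofList]
    exact front_eq_selKeys keys d
  rw [hfront]
  have hselnodup : sel.Nodup := by
    rw [← hfront, PySem.List.dedup_eq_ofList]
    exact (PySem.Set.nodup_ofList keys).filter _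
  have hseen : PySem.Set.ofList sel = sel := PySem.Set.ofList_eq_self_of_nodup _ hselnodup
  rw [hseen]
  rw [List.map_append]
  congr 1
  rw [hRemItems, items_filter_sel d hnd sel]
  rfl
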